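-- pv_equiv track=rewrite | github.com/logancantin/Stegonaut | imgsteg.py | str2bits
-- ===== SOURCE A (Python) =====
-- def str2bits(string):
--     bytevalues = list(bytes(string, 'ascii')) #Encoding string to list of byte values
--     bytestrings = [bin(x)[2:] for x in bytevalues] #Converting to binary string and removing '0b'
--     bits = "" #String to hold the bits when complete
--
--     i = 0 #current bit counter
--     for byte in bytestrings:
--
--         #Prepending a 0 to make sure the byte is 7 digits long
--         while len(byte) < 7:
--             byte = "0" + byte
--
--         bits += byte
--
--     #Return the bits
--     return bits
-- ===== SOURCE B (Python) =====
-- def str2bits(string):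
--     out = []
--     for byte in string.encode('ascii'):
--         for shift in range(6, -1, -1):
--             out.append(str((byte >> shift) & 1))
--     return "".join(out)
-- ===== Notes on version B (the rewrite author's own statement) =====
-- stated objective: alternative
-- what changed: B extracts each of the 7 bits per byte arithmetically with shift-and-mask over range(6,-1,-1) and joins a list at the end, instead of A's bin()-string slicing plus a while loop that left-pads with zeros and repeated string concatenation.
import Mathlib
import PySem

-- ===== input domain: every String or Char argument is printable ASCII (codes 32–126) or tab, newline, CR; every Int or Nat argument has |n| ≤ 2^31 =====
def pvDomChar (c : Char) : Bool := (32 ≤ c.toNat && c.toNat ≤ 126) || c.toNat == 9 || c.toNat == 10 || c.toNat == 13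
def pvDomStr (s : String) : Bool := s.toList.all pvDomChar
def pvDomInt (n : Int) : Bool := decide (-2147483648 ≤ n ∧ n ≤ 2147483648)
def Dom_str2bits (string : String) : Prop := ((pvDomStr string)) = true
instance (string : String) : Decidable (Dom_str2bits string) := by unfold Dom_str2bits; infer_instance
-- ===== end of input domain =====

-- B replaces bin()+left-zero-padding by direct shift/mask extraction of the 7 bits of each byte (objective: alternative decomposition, same cost).

-- ===== PORT A =====
-- bin(x)[2:] : binary digits of x without leading zeros (bin(0)[2:] = "0")
-- fuel only makes the recursion structural; 8 iterations suffice for every byte value < 256, exact on Dom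
def pvBinCore : Nat → Nat → List Char
  | 0, _ => []
  | fuel + 1, n => if n = 0 then [] else pvBinCore fuel (n / 2) ++ [if n % 2 == 1 then '1' else '0']

def pvBin (n : Nat) : List Char := if n == 0 then ['0'] else pvBinCore 8 n

-- the 'while len(byte) < 7: byte = "0" + byte' loop; fuel 7 bounds its ≤ 7 - len iterations
def pvPadGo : Nat → List Char → List Char
  | 0, s => s
  | fuel + 1, s => if s.length < 7 then pvPadGo fuel ('0' :: s) else s

def pvPad (s : List Char) : List Char := pvPadGo 7 s

def str2bits (string : String) : String :=
  -- bytevalues: Dom guarantees every char is ASCII, so bytes(string,'ascii') = the char codes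
  let bytevalues : List Nat := string.toList.map (fun c => c.toNat)
  let bytestrings : List (List Char) := bytevalues.map (fun x => pvBin x)
  -- bits = ""; for byte in bytestrings: pad; bits += byte
  String.ofList (bytestrings.foldl (fun bits byte => bits ++ pvPad byte) [])

-- ===== PORT B =====
-- (byte >> shift) & 1 is PySem.Int.band (byte >>> shift.toNat) 1, exact for these nonnegative ints
def pvBit (byte shift : Int) : String := PySem.Int.toStr (PySem.Int.band (byte >>> shift.toNat) 1)

def str2bits_alt (string : String) : String :=
  let out : List String :=
    (string.toList.map (fun c => (c.toNat : Int))).foldl (fun out byte =>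
      (PySem.List.pyRange 6 (-1) (-1)).foldl (fun out shift =>
        out ++ [pvBit byte shift]) out) []
  String.join out

-- ===== PRECONDITION & SPEC =====
def Spec_str2bits (string : String) (out : String) : Prop := out = str2bits_alt string
instance (string : String) (out : String) : Decidable (Spec_str2bits string out) := by unfold Spec_str2bits; infer_instance

-- ===== CLAIM (what is proved, stated in full; the proofs are below) =====
def Claim_equal_str2bits : Prop := ∀ (string : String), Dom_str2bits string → Spec_str2bits string (str2bits string)

-- ===== LEMMAS AND PROOFS =====

-- B's 7 one-bit strings for one byte value
def pvEnc7 (b : Int) : List String :=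
  [6,5,4,3,2,1,0].map (fun s : Int => pvBit b s)

theorem pvRange_lit : PySem.List.pyRange 6 (-1) (-1) = [6,5,4,3,2,1,0] := by decide

theorem pvInner (byte : Int) (out : List String) :
    (PySem.List.pyRange 6 (-1) (-1)).foldl (fun out shift =>
        out ++ [pvBit byte shift]) out
      = out ++ pvEnc7 byte := by
  rw [pvRange_lit]; simp [pvEnc7, List.foldl]

theorem pvOuterB (l : List Int) (out : List String) :
    l.foldl (fun out byte =>
      (PySem.List.pyRange 6 (-1) (-1)).foldl (fun out shift =>
        out ++ [pvBit byte shift]) out) out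
      = out ++ l.flatMap pvEnc7 := by
  induction l generalizing out with
  | nil => simp
  | cons b t ih => rw [List.foldl_cons, pvInner, ih]; simp

theorem pvOuterA (l : List (List Char)) (bits : List Char) :
    l.foldl (fun bits byte => bits ++ pvPad byte) bits
      = bits ++ l.flatMap pvPad := by
  induction l generalizing bits with
  | nil => simp
  | cons b t ih => simp [List.foldl, ih]

-- per-character agreement on the ASCII range
theorem pvCharEq : ∀ n : Fin 128,
    pvPad (pvBin n.val) = ((pvEnc7 (n.val : Int)).map String.toList).flatten := by
  decide

theorem pvFlat (l : List Char) (hall : ∀ c ∈ l, pvDomChar c = true) :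
    l.flatMap (fun c => pvPad (pvBin c.toNat))
      = ((l.flatMap (fun c => pvEnc7 ((c.toNat : Int)))).map String.toList).flatten := by
  induction l with
  | nil => simp
  | cons c t ih =>
      simp only [List.flatMap_cons, List.map_append, List.flatten_append]
      rw [ih (fun x hx => hall x (List.mem_cons_of_mem _ hx))]
      congr 1
      have hc := hall c (List.mem_cons_self ..)
      have hlt : c.toNat < 128 := by
        simp [pvDomChar] at hc
        omega
      exact pvCharEq ⟨c.toNat, hlt⟩

theorem str2bits_spec0 (string : String) (h : Dom_str2bits string) :
    str2bits string = str2bits_alt string := by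
  apply String.toList_injective
  simp only [str2bits, str2bits_alt, pvOuterA, pvOuterB, String.toList_join,
    String.toList_ofList, List.nil_append, List.flatMap_map]
  exact pvFlat string.toList (fun c hc => List.all_eq_true.mp h c hc)

-- ===== VERDICT (by name: the statement is the Claim_ definition above) =====
theorem str2bits_spec : Claim_equal_str2bits := by
  intro s h
  unfold Spec_str2bits
  exact str2bits_spec0 s h
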